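-- pv_equiv track=rewrite | github.com/quijanom614-del/unidad3 | ordenamiento.py | format_list_view
-- ===== SOURCE A (Python) =====
-- def format_list_view(lst, highlights=None, full_display=False, window=5):
--     """
--     Devuelve una cadena con una representación legible de la lista.
--     - Si full_display True -> muestra toda la lista.
--     - Si len(lst) > 60 y full_display False -> muestra:
--         primeros 10, ..., ventana alrededor de highlights, ..., últimos 10
--       para que se vea dónde ocurren los cambios sin imprimir 1000 números.
--     - highlights: iterable de índices a resaltar (se encierran con [ ]).
--     """
--     n = len(lst)
--     highlights = set(highlights or [])
--     def show_segment(start, end):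
--         parts = []
--         for i in range(start, end):
--             s = str(lst[i])
--             if i in highlights:
--                 s = f"[{s}]"
--             parts.append(s)
--         return ", ".join(parts)
--
--     if full_display or n <= 60:
--         return "[" + ", ".join(("[{}]".format(x) if i in highlights else str(x))
--                               for i, x in enumerate(lst)) + "]"
--
--
--     left_count = 10
--     right_count = 10
--
--     segments = []
--     segments.append(show_segment(0, min(left_count, n)))
--
--
--     mid_indices = set()
--     for idx in highlights:
--         for k in range(idx - window, idx + window + 1):
--             if 0 <= k < n:
--                 mid_indices.add(k)
--
--
--     if not mid_indices:
--         mid_start = max(left_count, (n // 2) - window)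
--         mid_end = min(n - right_count, mid_start + 2*window + 1)
--         if mid_start < mid_end:
--             segments.append("...")
--             segments.append(show_segment(mid_start, mid_end))
--             segments.append("...")
--     else:
--
--         mids = sorted(mid_indices)
--
--         mids = [m for m in mids if m >= left_count and m < n - right_count]
--         if mids:
--             runs = []
--             run = [mids[0], mids[0]]
--             for x in mids[1:]:
--                 if x <= run[1] + 1:
--                     run[1] = x
--                 else:
--                     runs.append(tuple(run))
--                     run = [x, x]
--             runs.append(tuple(run))
--             for (s, e) in runs:
--                 segments.append("...")
--                 segments.append(show_segment(s, e+1))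
--             segments.append("...")
--         else:
--             segments.append("...")
--
--
--     if n > right_count:
--         segments.append(show_segment(n - right_count, n))
--     return "[" + " , ".join(segments) + "]"
-- ===== SOURCE B (Python) =====
-- def format_list_view(lst, highlights=None, full_display=False, window=5):
--     n = len(lst)
--     hs = set(highlights or [])
--
--     def seg(a, b):
--         return ", ".join("[%s]" % lst[i] if i in hs else str(lst[i])
--                          for i in range(a, b))
--
--     if full_display or n <= 60:
--         return "[" + seg(0, n) + "]"
--
--     def hit(k):
--         return any(i - window <= k <= i + window for i in hs)
--
--     def runs_of(ms):
--         if not ms: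
--             return []
--         e, rest = ms[0], ms[1:]
--         while rest and rest[0] <= e + 1:
--             e, rest = rest[0], rest[1:]
--         return [(ms[0], e)] + runs_of(rest)
--
--     covered = [k for k in range(n) if hit(k)]
--     segs = [seg(0, 10)]
--     if covered:
--         mids = [k for k in covered if 10 <= k < n - 10]
--         for s, e in runs_of(mids):
--             segs.append("...")
--             segs.append(seg(s, e + 1))
--         segs.append("...")
--     else:
--         mid_start = max(10, (n // 2) - window)
--         mid_end = min(n - 10, mid_start + 2 * window + 1)
--         if mid_start < mid_end:
--             segs += ["...", seg(mid_start, mid_end), "..."]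
--     segs.append(seg(n - 10, n))
--     return "[" + " , ".join(segs) + "]"
-- ===== Notes on version B (the rewrite author's own statement) =====
-- stated objective: alternative
-- what changed: A expands every highlight into a window-index set, sorts and deduplicates it, filters it, and folds it into runs with an accumulator triple; B never builds that set: it scans the full index range once with a membership predicate, clips with a list filter, and groups consecutive hits into runs by structural recursion, reusing one map/join segment renderer for every branch including the small-list case.
import Mathlib
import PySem

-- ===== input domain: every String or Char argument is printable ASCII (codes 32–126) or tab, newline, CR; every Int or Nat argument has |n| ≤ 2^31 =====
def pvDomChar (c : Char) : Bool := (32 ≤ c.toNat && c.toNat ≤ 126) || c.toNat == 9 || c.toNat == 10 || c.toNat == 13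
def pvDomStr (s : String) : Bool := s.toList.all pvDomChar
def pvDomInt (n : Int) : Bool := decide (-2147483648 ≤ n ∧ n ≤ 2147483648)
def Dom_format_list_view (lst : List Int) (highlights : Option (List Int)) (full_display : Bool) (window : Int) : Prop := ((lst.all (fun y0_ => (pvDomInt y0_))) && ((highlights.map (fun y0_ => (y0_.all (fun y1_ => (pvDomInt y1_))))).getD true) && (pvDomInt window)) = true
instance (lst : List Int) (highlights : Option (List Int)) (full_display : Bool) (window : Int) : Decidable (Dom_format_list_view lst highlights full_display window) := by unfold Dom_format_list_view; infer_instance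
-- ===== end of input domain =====

-- B replaces A's window-set + sort + dedup + run-fold by a single predicate scan of the
-- index range with recursive run grouping, and one shared map/join segment renderer
-- (objective: alternative structure, same exact output).

-- ===== PORT A =====
-- A's show_segment: accumulates parts with repeated append, then joins.
def pvShowSegment (lst : List Int) (hs : PySem.Set Int) (a b : Int) : String :=
  PySem.Str.join ", "
    ((PySem.List.pyRange a b).foldl (fun parts i =>
      parts ++ [if hs.contains i then "[" ++ PySem.Int.toStr (PySem.List.pyGetD lst i 0) ++ "]"
                else PySem.Int.toStr (PySem.List.pyGetD lst i 0)]) [])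

def format_list_view (lst : List Int) (highlights : Option (List Int)) (full_display : Bool) (window : Int) : String :=
  let n : Int := PySem.List.len lst
  let hs : PySem.Set Int := PySem.Set.ofList (highlights.getD [])
  if full_display || decide (n ≤ 60) then
    "[" ++ PySem.Str.join ", " ((PySem.List.enumerate lst).map (fun p =>
      if hs.contains p.1 then "[" ++ PySem.Int.toStr p.2 ++ "]" else PySem.Int.toStr p.2)) ++ "]"
  else
    let left_count : Int := 10
    let right_count : Int := 10
    let segments : List String := [pvShowSegment lst hs 0 (min left_count n)]
    let mid_indices : PySem.Set Int :=
      hs.foldl (fun m idx =>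
        (PySem.List.pyRange (idx - window) (idx + window + 1)).foldl
          (fun m k => if 0 ≤ k ∧ k < n then PySem.Set.add m k else m) m) (PySem.Set.empty : PySem.Set Int)
    let segments : List String :=
      if mid_indices.isEmpty then
        let mid_start := max left_count (PySem.Int.floordiv n 2 - window)
        let mid_end := min (n - right_count) (mid_start + 2 * window + 1)
        if mid_start < mid_end then
          segments ++ ["...", pvShowSegment lst hs mid_start mid_end, "..."]
        else segments
      else
        let mids := (PySem.List.sorted mid_indices (fun x => x)).filter
          (fun m => decide (left_count ≤ m ∧ m < n - right_count))
        if mids.isEmpty then segments ++ ["..."]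
        else
          let m0 := PySem.List.pyGetD mids 0 0        -- mids[0] (in range: mids nonempty)
          let rest := mids.tail                        -- mids[1:]
          let runs :=
            (rest.foldl (fun (st : List (Int × Int) × Int × Int) x =>
                if x ≤ st.2.2 + 1 then (st.1, st.2.1, x)
                else (st.1 ++ [(st.2.1, st.2.2)], x, x)) ([], m0, m0)).1 ++
            [((rest.foldl (fun (st : List (Int × Int) × Int × Int) x =>
                if x ≤ st.2.2 + 1 then (st.1, st.2.1, x)
                else (st.1 ++ [(st.2.1, st.2.2)], x, x)) ([], m0, m0)).2.1,
              (rest.foldl (fun (st : List (Int × Int) × Int × Int) x =>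
                if x ≤ st.2.2 + 1 then (st.1, st.2.1, x)
                else (st.1 ++ [(st.2.1, st.2.2)], x, x)) ([], m0, m0)).2.2)]
          (runs.foldl (fun segs r => segs ++ ["...", pvShowSegment lst hs r.1 (r.2 + 1)]) segments) ++ ["..."]
    let segments : List String :=
      if right_count < n then segments ++ [pvShowSegment lst hs (n - right_count) n] else segments
    "[" ++ PySem.Str.join " , " segments ++ "]"

-- ===== PORT B =====
-- B's seg: one map over the index range, joined.
def pvSeg (lst : List Int) (hs : PySem.Set Int) (a b : Int) : String :=
  PySem.Str.join ", " ((PySem.List.pyRange a b).map (fun i =>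
    if hs.contains i then "[" ++ PySem.Int.toStr (PySem.List.pyGetD lst i 0) ++ "]"
    else PySem.Int.toStr (PySem.List.pyGetD lst i 0)))

-- B's inner while loop: swallow list elements while they extend the current run.
def pvExtendRun : Int → List Int → Int × List Int
  | e, [] => (e, [])
  | e, y :: ys => if y ≤ e + 1 then pvExtendRun y ys else (e, y :: ys)

-- termination measure for pvRunsOf (the port cites it in decreasing_by)
theorem pvExtendRun_snd_length (e : Int) (xs : List Int) :
    (pvExtendRun e xs).2.length ≤ xs.length := by
  induction xs generalizing e with
  | nil => simp [pvExtendRun]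
  | cons y ys ih =>
    simp only [pvExtendRun]
    split
    · exact le_trans (ih y) (Nat.le_succ _)
    · simp

-- B's runs_of: recursive grouping of consecutive runs.
def pvRunsOf : List Int → List (Int × Int)
  | [] => []
  | m :: ms => (m, (pvExtendRun m ms).1) :: pvRunsOf (pvExtendRun m ms).2
termination_by xs => xs.length
decreasing_by
  simpa [Nat.lt_succ_iff] using pvExtendRun_snd_length m ms

def format_list_view_alt (lst : List Int) (highlights : Option (List Int)) (full_display : Bool) (window : Int) : String :=
  let n : Int := PySem.List.len lst
  let hs : PySem.Set Int := PySem.Set.ofList (highlights.getD [])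
  if full_display || decide (n ≤ 60) then
    "[" ++ pvSeg lst hs 0 n ++ "]"
  else
    let covered := (PySem.List.pyRange 0 n).filter
      (fun k => hs.any (fun i => decide (i - window ≤ k ∧ k ≤ i + window)))
    let segs : List String := [pvSeg lst hs 0 10]
    let segs : List String :=
      if !covered.isEmpty then
        let mids := covered.filter (fun k => decide (10 ≤ k ∧ k < n - 10))
        ((pvRunsOf mids).foldl (fun segs r => segs ++ ["...", pvSeg lst hs r.1 (r.2 + 1)]) segs) ++ ["..."]
      else
        let mid_start := max 10 (PySem.Int.floordiv n 2 - window)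
        let mid_end := min (n - 10) (mid_start + 2 * window + 1)
        if mid_start < mid_end then segs ++ ["...", pvSeg lst hs mid_start mid_end, "..."]
        else segs
    "[" ++ PySem.Str.join " , " (segs ++ [pvSeg lst hs (n - 10) n]) ++ "]"

-- ===== PRECONDITION & SPEC =====
def Spec_format_list_view (lst : List Int) (highlights : Option (List Int)) (full_display : Bool) (window : Int) (out : String) : Prop := out = format_list_view_alt lst highlights full_display window
instance (lst : List Int) (highlights : Option (List Int)) (full_display : Bool) (window : Int) (out : String) : Decidable (Spec_format_list_view lst highlights full_display window out) := by unfold Spec_format_list_view; infer_instance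

-- ===== CLAIM (what is proved, stated in full; the proofs are below) =====
def Claim_equal_format_list_view : Prop := ∀ (lst : List Int) (highlights : Option (List Int)) (full_display : Bool) (window : Int), Dom_format_list_view lst highlights full_display window → Spec_format_list_view lst highlights full_display window (format_list_view lst highlights full_display window)

-- ===== LEMMAS AND PROOFS =====

-- A's accumulate-and-join segment equals B's map-and-join segment.
theorem pvSeg_eq (lst : List Int) (hs : PySem.Set Int) (a b : Int) :
    pvShowSegment lst hs a b = pvSeg lst hs a b := by
  unfold pvShowSegment pvSeg
  rw [PySem.List.foldl_append_singleton_eq_map]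
  rw [List.nil_append]

-- the full-display / small-list branch
theorem pvFull_eq (lst : List Int) (hs : PySem.Set Int) :
    PySem.Str.join ", " ((PySem.List.enumerate lst).map (fun p =>
      if hs.contains p.1 then "[" ++ PySem.Int.toStr p.2 ++ "]" else PySem.Int.toStr p.2)) =
    pvSeg lst hs 0 (PySem.List.len lst) := by
  rw [PySem.List.enumerate_eq_map_pyRange lst 0, List.map_map]
  rfl

-- membership after A's inner bounded-add loop
theorem pv_mem_inner (n : Int) (L : List Int) (m : PySem.Set Int) (k : Int) :
    (k ∈ L.foldl (fun m k => if 0 ≤ k ∧ k < n then PySem.Set.add m k else m) m) ↔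
      k ∈ m ∨ (k ∈ L ∧ 0 ≤ k ∧ k < n) := by
  induction L generalizing m with
  | nil => simp
  | cons a L ih =>
    rw [List.foldl_cons, ih]
    by_cases h : 0 ≤ a ∧ a < n
    · rw [if_pos h, PySem.Set.mem_add]
      constructor
      · rintro ((hm | rfl) | ⟨hL, hb⟩)
        · exact Or.inl hm
        · exact Or.inr ⟨List.mem_cons_self, h⟩
        · exact Or.inr ⟨List.mem_cons_of_mem _ hL, hb⟩
      · rintro (hm | ⟨hL, hb⟩)
        · exact Or.inl (Or.inl hm)
        · rcases List.mem_cons.mp hL with rfl | hL'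
          · exact Or.inl (Or.inr rfl)
          · exact Or.inr ⟨hL', hb⟩
    · rw [if_neg h]
      constructor
      · rintro (hm | ⟨hL, hb⟩)
        · exact Or.inl hm
        · exact Or.inr ⟨List.mem_cons_of_mem _ hL, hb⟩
      · rintro (hm | ⟨hL, hb⟩)
        · exact Or.inl hm
        · rcases List.mem_cons.mp hL with rfl | hL'
          · exact absurd hb h
          · exact Or.inr ⟨hL', hb⟩

theorem pv_nodup_inner (n : Int) (L : List Int) (m : PySem.Set Int) (hm : m.Nodup) :
    (L.foldl (fun m k => if 0 ≤ k ∧ k < n then PySem.Set.add m k else m) m).Nodup := by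
  induction L generalizing m with
  | nil => simpa
  | cons a L ih =>
    rw [List.foldl_cons]
    apply ih
    split
    · exact PySem.Set.nodup_add m a hm
    · exact hm

-- membership in A's mid_indices set
theorem pv_mem_mid (hsL : List Int) (window n : Int) (m : PySem.Set Int) (k : Int) :
    (k ∈ hsL.foldl (fun m idx =>
        (PySem.List.pyRange (idx - window) (idx + window + 1)).foldl
          (fun m k => if 0 ≤ k ∧ k < n then PySem.Set.add m k else m) m) m) ↔
      k ∈ m ∨ ((∃ i ∈ hsL, i - window ≤ k ∧ k ≤ i + window) ∧ 0 ≤ k ∧ k < n) := by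
  induction hsL generalizing m with
  | nil => simp
  | cons a t ih =>
    rw [List.foldl_cons, ih, pv_mem_inner]
    constructor
    · rintro ((hm | ⟨hr, hb⟩) | ⟨⟨i, hi, hik⟩, hb⟩)
      · exact Or.inl hm
      · rw [PySem.List.mem_pyRange_one] at hr
        exact Or.inr ⟨⟨a, List.mem_cons_self, by omega⟩, hb⟩
      · exact Or.inr ⟨⟨i, List.mem_cons_of_mem _ hi, hik⟩, hb⟩
    · rintro (hm | ⟨⟨i, hi, hik⟩, hb⟩)
      · exact Or.inl (Or.inl hm)
      · rcases List.mem_cons.mp hi with rfl | hi'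
        · exact Or.inl (Or.inr ⟨PySem.List.mem_pyRange_one.mpr (by omega), hb⟩)
        · exact Or.inr ⟨⟨i, hi', hik⟩, hb⟩

theorem pv_nodup_mid (hsL : List Int) (window n : Int) (m : PySem.Set Int) (hm : m.Nodup) :
    (hsL.foldl (fun m idx =>
        (PySem.List.pyRange (idx - window) (idx + window + 1)).foldl
          (fun m k => if 0 ≤ k ∧ k < n then PySem.Set.add m k else m) m) m).Nodup := by
  induction hsL generalizing m with
  | nil => simpa
  | cons a t ih =>
    rw [List.foldl_cons]
    exact ih _ (pv_nodup_inner _ _ _ hm)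

-- A's sorted mid_indices is exactly B's covered list (the hit-filtered index range).
theorem pv_sorted_mid_eq (hs : PySem.Set Int) (window n : Int) :
    PySem.List.sorted
      (hs.foldl (fun m idx =>
        (PySem.List.pyRange (idx - window) (idx + window + 1)).foldl
          (fun m k => if 0 ≤ k ∧ k < n then PySem.Set.add m k else m) m) (PySem.Set.empty : PySem.Set Int))
      (fun x => x) =
    (PySem.List.pyRange 0 n).filter
      (fun k => hs.any (fun i => decide (i - window ≤ k ∧ k ≤ i + window))) := by
  set MID := hs.foldl (fun m idx =>
      (PySem.List.pyRange (idx - window) (idx + window + 1)).foldl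
        (fun m k => if 0 ≤ k ∧ k < n then PySem.Set.add m k else m) m) (PySem.Set.empty : PySem.Set Int) with hMID
  have hmem : ∀ k, k ∈ MID ↔ (∃ i ∈ hs, i - window ≤ k ∧ k ≤ i + window) ∧ 0 ≤ k ∧ k < n := by
    intro k
    rw [hMID, pv_mem_mid]
    simp [PySem.Set.empty]
  have hnodupM : MID.Nodup := pv_nodup_mid hs window n _ (by simp [PySem.Set.empty])
  set Pb : Int → Bool := fun k => hs.any (fun i => decide (i - window ≤ k ∧ k ≤ i + window)) with hPb
  have hPbiff : ∀ k, Pb k = true ↔ ∃ i ∈ hs, i - window ≤ k ∧ k ≤ i + window := by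
    intro k; simp [hPb, List.any_eq_true]
  have hpairR0 : ((PySem.List.pyRange 0 n).filter Pb).Pairwise (· < ·) :=
    List.Pairwise.filter _ (PySem.List.pairwise_lt_pyRange_one 0 n)
  have hnodupR0 : ((PySem.List.pyRange 0 n).filter Pb).Nodup :=
    hpairR0.imp (fun h => ne_of_lt h)
  have hperm : ((PySem.List.pyRange 0 n).filter Pb).Perm MID := by
    rw [List.perm_ext_iff_of_nodup hnodupR0 hnodupM]
    intro k
    rw [List.mem_filter, hmem, PySem.List.mem_pyRange_one, hPbiff]
    constructor
    · rintro ⟨⟨h0, h1⟩, h2⟩; exact ⟨h2, h0, h1⟩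
    · rintro ⟨h2, h0, h1⟩; exact ⟨⟨h0, h1⟩, h2⟩
  exact PySem.List.sorted_eq_of_perm_of_pairwise_lt MID ((PySem.List.pyRange 0 n).filter Pb) _ hperm hpairR0

theorem pvRunsOf_nil : pvRunsOf [] = [] := by
  unfold pvRunsOf
  rfl

theorem pvRunsOf_cons (m0 : Int) (rest : List Int) :
    ((m0, (pvExtendRun m0 rest).1) :: pvRunsOf (pvExtendRun m0 rest).2) = pvRunsOf (m0 :: rest) := by
  conv_rhs => unfold pvRunsOf

-- A's run-accumulating fold computes B's recursive grouping.
theorem pv_runs_fold_eq (xs : List Int) (acc : List (Int × Int)) (s e : Int) :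
    (xs.foldl (fun (st : List (Int × Int) × Int × Int) x =>
        if x ≤ st.2.2 + 1 then (st.1, st.2.1, x)
        else (st.1 ++ [(st.2.1, st.2.2)], x, x)) (acc, s, e)).1 ++
      [((xs.foldl (fun (st : List (Int × Int) × Int × Int) x =>
          if x ≤ st.2.2 + 1 then (st.1, st.2.1, x)
          else (st.1 ++ [(st.2.1, st.2.2)], x, x)) (acc, s, e)).2.1,
        (xs.foldl (fun (st : List (Int × Int) × Int × Int) x =>
          if x ≤ st.2.2 + 1 then (st.1, st.2.1, x)
          else (st.1 ++ [(st.2.1, st.2.2)], x, x)) (acc, s, e)).2.2)] =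
    acc ++ (s, (pvExtendRun e xs).1) :: pvRunsOf (pvExtendRun e xs).2 := by
  induction xs generalizing acc s e with
  | nil => simp [pvExtendRun, pvRunsOf_nil]
  | cons y ys ih =>
    simp only [List.foldl_cons, pvExtendRun]
    by_cases h : y ≤ e + 1
    · simp only [if_pos h]
      exact ih acc s y
    · simp only [if_neg h]
      rw [ih (acc ++ [(s, e)]) y y, ← pvRunsOf_cons]
      simp

-- ===== VERDICT (by name: the statement is the Claim_ definition above) =====
theorem format_list_view_spec : Claim_equal_format_list_view := by
  intro lst highlights full_display window _
  unfold Spec_format_list_view format_list_view format_list_view_alt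
  by_cases hfd : (full_display || decide (PySem.List.len lst ≤ 60)) = true
  · rw [if_pos hfd, if_pos hfd, pvFull_eq]
  · rw [if_neg hfd, if_neg hfd]
    have hn : 60 < PySem.List.len lst := by
      simp only [Bool.or_eq_true, decide_eq_true_eq] at hfd
      omega
    set hs : PySem.Set Int := PySem.Set.ofList (highlights.getD []) with hhs
    set n : Int := PySem.List.len lst with hnn
    dsimp only
    simp only [pvSeg_eq]
    rw [min_eq_left (by omega : (10 : Int) ≤ n)]
    rw [if_pos (by omega : (10 : Int) < n)]
    set MID := hs.foldl (fun m idx =>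
        (PySem.List.pyRange (idx - window) (idx + window + 1)).foldl
          (fun m k => if 0 ≤ k ∧ k < n then PySem.Set.add m k else m) m)
        (PySem.Set.empty : PySem.Set Int) with hMID
    set covered := (PySem.List.pyRange 0 n).filter
        (fun k => hs.any (fun i => decide (i - window ≤ k ∧ k ≤ i + window))) with hcov
    have hsorted : PySem.List.sorted MID (fun x => x) = covered :=
      pv_sorted_mid_eq hs window n
    have hceq : covered = [] ↔ MID = [] := by
      rw [← hsorted, PySem.List.sorted_eq_nil_iff]
    by_cases hE : MID = []
    · have hcnil : covered = [] := hceq.mpr hE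
      rw [if_pos (by simp [hE]), if_neg (show ¬((!covered.isEmpty) = true) by simp [hcnil])]
    · have hcne : covered ≠ [] := fun h => hE (hceq.mp h)
      have hBc : (!covered.isEmpty) = true := by
        simp [List.isEmpty_eq_false_iff.mpr hcne]
      rw [if_neg (show ¬(MID.isEmpty = true) by simp [hE]), if_pos hBc, hsorted]
      set mids := covered.filter (fun k => decide (10 ≤ k ∧ k < n - 10)) with hmids
      by_cases hm0 : mids = []
      · rw [if_pos (by rw [List.isEmpty_iff]; exact hm0), hm0, pvRunsOf_nil]
        rfl
      · obtain ⟨m0, rest, hm⟩ := List.exists_cons_of_ne_nil hm0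
        rw [hm]
        rw [if_neg (by simp)]
        rw [PySem.List.pyGetD_zero_cons, List.tail_cons]
        rw [pv_runs_fold_eq rest [] m0 m0, List.nil_append, pvRunsOf_cons]
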